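-- pv_equiv track=rewrite | github.com/NeighbourWise-AI/neighbourwise.ai_version1 | Airflow/dags/healthcare_dataload_dag.py | _dedupe_cols
-- ===== SOURCE A (Python) =====
-- from typing import Optional, List, Dict, Tuple
-- from typing import List
--
-- def _dedupe_cols(cols: List[str]) -> List[str]:
--     seen: Dict[str, int] = {}
--     out: List[str] = []
--     for c in cols:
--         if c in seen:
--             seen[c] += 1
--             out.append(f"{c}_{seen[c]}")
--         else:
--             seen[c] = 0
--             out.append(c)
--     return out
-- ===== SOURCE B (Python) =====
-- from typing import List
--
-- def _dedupe_cols(cols: List[str]) -> List[str]: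
--     groups = {}
--     for i, c in enumerate(cols):
--         groups.setdefault(c, []).append(i)
--     out = [""] * len(cols)
--     for c, idxs in groups.items():
--         out[idxs[0]] = c
--         for k in range(1, len(idxs)):
--             out[idxs[k]] = f"{c}_{k}"
--     return out
-- ===== Notes on version B (the rewrite author's own statement) =====
-- stated objective: alternative
-- what changed: Replaces A's single append pass with a running dict counter by a group-then-scatter algorithm: one pass groups each name's positions, then a preallocated output array is filled group by group (k-th occurrence of c written as c_k), out of input order.
import Mathlib
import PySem

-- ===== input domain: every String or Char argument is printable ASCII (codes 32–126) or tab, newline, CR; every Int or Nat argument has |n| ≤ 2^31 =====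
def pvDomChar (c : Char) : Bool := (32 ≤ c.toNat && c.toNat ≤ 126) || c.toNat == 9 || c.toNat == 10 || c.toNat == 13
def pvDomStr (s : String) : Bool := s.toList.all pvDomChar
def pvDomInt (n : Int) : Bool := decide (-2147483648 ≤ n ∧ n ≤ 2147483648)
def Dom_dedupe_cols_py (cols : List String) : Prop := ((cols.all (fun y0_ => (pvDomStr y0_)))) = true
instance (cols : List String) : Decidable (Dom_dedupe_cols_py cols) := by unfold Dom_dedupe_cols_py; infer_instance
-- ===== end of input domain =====

-- B replaces A's single pass with a running duplicate counter by group-then-scatter: group each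
-- name's positions first, then fill a preallocated output array group by group (objective: alternative).

-- ===== PORT A =====
def dedupe_cols_py (cols : List String) : List String :=
  (cols.foldl
    (fun (st : PySem.Dict String Int × List String) c =>
      if st.1.contains c then
        let v := st.1.getD c 0 + 1                -- seen[c] += 1
        (st.1.insert c v, st.2 ++ [c ++ "_" ++ PySem.Int.toStr v])
      else
        (st.1.insert c 0, st.2 ++ [c]))
    ((PySem.Dict.empty : PySem.Dict String Int), ([] : List String))).2

-- ===== PORT B =====
def dedupe_cols_py_alt (cols : List String) : List String :=
  -- groups.setdefault(c, []).append(i)  ==  groups[c] = groups.get(c, []) + [i]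
  let groups : PySem.Dict String (List Int) :=
    (PySem.List.enumerate cols).foldl
      (fun d ic => d.modify ic.2 [] (· ++ [ic.1])) PySem.Dict.empty
  let out0 := List.replicate cols.length ""
  groups.items.foldl
    (fun out ci =>
      let out1 := PySem.List.pySetD out (PySem.List.pyGetD ci.2 0 0) ci.1
      (PySem.List.pyRange 1 (ci.2.length : Int) 1).foldl
        (fun o k => PySem.List.pySetD o (PySem.List.pyGetD ci.2 k 0)
          (ci.1 ++ "_" ++ PySem.Int.toStr k)) out1)
    out0

-- ===== PRECONDITION & SPEC =====
def Spec_dedupe_cols_py (cols : List String) (out : List String) : Prop := out = dedupe_cols_py_alt cols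
instance (cols : List String) (out : List String) : Decidable (Spec_dedupe_cols_py cols out) := by unfold Spec_dedupe_cols_py; infer_instance

-- ===== CLAIM (what is proved, stated in full; the proofs are below) =====
def Claim_equal_dedupe_cols_py : Prop := ∀ (cols : List String), Dom_dedupe_cols_py cols → Spec_dedupe_cols_py cols (dedupe_cols_py cols)

-- ===== LEMMAS AND PROOFS =====

-- the value written for the k-th occurrence of name c
def pvVal (c : String) (k : Nat) : String :=
  if k = 0 then c else c ++ "_" ++ PySem.Int.toStr (k : Int)

-- pointwise reference: output element i is pvVal (cols[i]) (occurrences of cols[i] before i)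
def pvRef (cols : List String) : List String :=
  (List.range cols.length).map (fun i => pvVal (cols.getD i "") ((cols.take i).count (cols.getD i "")))

-- ---------- A-side: canonical recursive form, then pointwise ----------

def pvDedupeFrom (pre rest : List String) : List String :=
  match rest with
  | [] => []
  | c :: rs =>
    (if pre.count c = 0 then c else c ++ "_" ++ PySem.Int.toStr (pre.count c : Int))
      :: pvDedupeFrom (pre ++ [c]) rs

-- A's invariant: seen maps c to (count of c in processed prefix) - 1, absent iff count = 0
theorem pvA_inv (rest : List String) :
    ∀ (pre out : List String) (seen : PySem.Dict String Int),
      (∀ c, seen.get? c = if pre.count c = 0 then none else some ((pre.count c : Int) - 1)) →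
      (rest.foldl
        (fun (st : PySem.Dict String Int × List String) c =>
          if st.1.contains c then
            let v := st.1.getD c 0 + 1
            (st.1.insert c v, st.2 ++ [c ++ "_" ++ PySem.Int.toStr v])
          else
            (st.1.insert c 0, st.2 ++ [c]))
        (seen, out)).2 = out ++ pvDedupeFrom pre rest := by
  induction rest with
  | nil => intro pre out seen _; simp [pvDedupeFrom]
  | cons c rs ih =>
    intro pre out seen hinv
    simp only [List.foldl_cons, pvDedupeFrom]
    have hcont : seen.contains c = (seen.get? c).isSome := PySem.Dict.contains_eq_isSome_get? ..
    by_cases h0 : pre.count c = 0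
    · have hget : seen.get? c = none := by rw [hinv c, if_pos h0]
      rw [if_neg (by simp [hcont, hget])]
      rw [ih (pre ++ [c]) _ _ ?_]
      · simp [h0]
      · intro x
        by_cases hx : x = c
        · subst hx
          rw [PySem.Dict.get?_insert_self]
          have hc : (pre ++ [x]).count x = pre.count x + 1 := by simp
          rw [hc, h0, if_neg (by omega)]
          norm_num
        · rw [PySem.Dict.get?_insert_of_ne _ _ hx, hinv x]
          have hx' : ¬ c = x := fun h => hx h.symm
          simp [List.count_append, hx']
    · have hget : seen.get? c = some ((pre.count c : Int) - 1) := by rw [hinv c, if_neg h0]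
      rw [if_pos (by simp [hcont, hget])]
      have hgetD : seen.getD c 0 = (pre.count c : Int) - 1 :=
        PySem.Dict.getD_of_get?_eq_some _ _ hget
      rw [ih (pre ++ [c]) _ _ ?_]
      · simp only [hgetD, if_neg h0]
        have : (pre.count c : Int) - 1 + 1 = (pre.count c : Int) := by ring
        rw [this, List.append_assoc]; rfl
      · intro x
        by_cases hx : x = c
        · subst hx
          rw [PySem.Dict.get?_insert_self, hgetD]
          have hc : (pre ++ [x]).count x = pre.count x + 1 := by simp
          rw [hc, if_neg (by omega)]
          congr 1
          push_cast
          ring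
        · rw [PySem.Dict.get?_insert_of_ne _ _ hx, hinv x]
          have hx' : ¬ c = x := fun h => hx h.symm
          simp [List.count_append, hx']

theorem pvA_eq (cols : List String) : dedupe_cols_py cols = pvDedupeFrom [] cols := by
  unfold dedupe_cols_py
  rw [pvA_inv cols [] [] PySem.Dict.empty (by intro c; simp [PySem.Dict.get?_empty])]
  simp

theorem pvDedupeFrom_eq_map (rest : List String) :
    ∀ pre, pvDedupeFrom pre rest =
      (List.range rest.length).map (fun k =>
        pvVal (rest.getD k "") ((pre ++ rest.take k).count (rest.getD k ""))) := by
  induction rest with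
  | nil => intro pre; simp [pvDedupeFrom]
  | cons c rs ih =>
    intro pre
    rw [pvDedupeFrom, List.length_cons, List.range_succ_eq_map, List.map_cons, List.map_map]
    congr 1
    · simp [pvVal]
    · rw [ih (pre ++ [c])]
      apply List.map_congr_left
      intro k _
      simp [List.append_assoc]

theorem pvA_ref (cols : List String) : dedupe_cols_py cols = pvRef cols := by
  rw [pvA_eq, pvDedupeFrom_eq_map, pvRef]
  simp

-- ---------- B-side ----------

-- the positions (Nat) at which c occurs in cols, in increasing order
def pvIdx (cols : List String) (c : String) : List Nat :=
  (List.range cols.length).filter (fun j => cols.getD j "" == c)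

theorem pvIdx_cons (x : String) (xs : List String) (c : String) :
    pvIdx (x :: xs) c
      = (if x == c then [0] else []) ++ (pvIdx xs c).map Nat.succ := by
  unfold pvIdx
  rw [List.length_cons, List.range_succ_eq_map, List.filter_cons, List.filter_map]
  simp only [Function.comp_def, List.getD_cons_succ, List.getD_cons_zero]
  split_ifs with h
  · rfl
  · rfl

theorem pvGroups_swap (cols : List String) :
    (PySem.List.enumerate cols).foldl
      (fun (d : PySem.Dict String (List Int)) ic => d.modify ic.2 [] (· ++ [ic.1])) PySem.Dict.empty
    = ((PySem.List.enumerate cols).map (fun ic => (ic.2, ic.1))).foldl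
      (fun (d : PySem.Dict String (List Int)) p => d.modify p.1 [] (· ++ [p.2])) PySem.Dict.empty := by
  rw [List.foldl_map]

theorem pvSwap_filter (cols : List String) (c : String) :
    ∀ s : Int,
      ((((PySem.List.enumerate cols s).map (fun ic => (ic.2, ic.1))).filter
          (fun p => p.1 == c)).map (fun p => p.2))
        = (pvIdx cols c).map (fun (j : Nat) => s + (j : Int)) := by
  induction cols with
  | nil => intro s; simp [PySem.List.enumerate_nil, pvIdx]
  | cons x xs ih =>
    intro s
    rw [PySem.List.enumerate_cons, List.map_cons, List.filter_cons, pvIdx_cons,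
      List.map_append, List.map_map]
    by_cases h : x == c
    · rw [if_pos h, if_pos h, List.map_cons, ih (s + 1)]
      simp only [List.map_cons, List.map_nil, List.cons_append, List.nil_append, List.cons.injEq]
      refine ⟨by simp, ?_⟩
      apply List.map_congr_left
      intro j _
      simp only [Function.comp_apply, Nat.succ_eq_add_one]
      push_cast
      ring
    · rw [if_neg h, if_neg h, ih (s + 1)]
      simp only [List.map_nil, List.nil_append]
      apply List.map_congr_left
      intro j _
      simp only [Function.comp_apply, Nat.succ_eq_add_one]
      push_cast
      ring

theorem pvGroups_getD (cols : List String) (c : String) :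
    ((PySem.List.enumerate cols).foldl
      (fun (d : PySem.Dict String (List Int)) ic => d.modify ic.2 [] (· ++ [ic.1]))
      PySem.Dict.empty).getD c []
    = (pvIdx cols c).map (fun (j : Nat) => (j : Int)) := by
  rw [pvGroups_swap, PySem.Dict.getD_foldl_modify_append]
  rw [PySem.Dict.getD_empty, List.nil_append, pvSwap_filter cols c 0]
  simp

theorem pvGroups_keys (cols : List String) :
    ((PySem.List.enumerate cols).foldl
      (fun (d : PySem.Dict String (List Int)) ic => d.modify ic.2 [] (· ++ [ic.1]))
      PySem.Dict.empty).keys = PySem.Set.ofList cols := by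
  rw [PySem.Dict.keys_foldl_modify_key (key := fun ic : Int × String => ic.2)]
  rw [PySem.Dict.keys_empty, PySem.List.map_snd_enumerate, PySem.Set.update_nil_left]

theorem pvGroups_items (cols : List String) :
    ((PySem.List.enumerate cols).foldl
      (fun (d : PySem.Dict String (List Int)) ic => d.modify ic.2 [] (· ++ [ic.1]))
      PySem.Dict.empty).items
    = (PySem.Set.ofList cols).map (fun c => (c, (pvIdx cols c).map (fun (j : Nat) => (j : Int)))) := by
  rw [PySem.Dict.items_eq_map_keys _ ?nd ([] : List Int)]
  case nd =>
    rw [pvGroups_keys]; exact PySem.Set.nodup_ofList cols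
  rw [pvGroups_keys]
  apply List.map_congr_left
  intro c _
  rw [pvGroups_getD]

-- basic facts about pvIdx
theorem pvIdx_mem {cols : List String} {c : String} {j : Nat} :
    j ∈ pvIdx cols c ↔ j < cols.length ∧ cols.getD j "" = c := by
  unfold pvIdx
  simp [List.mem_filter, List.mem_range]

theorem pvIdx_nodup (cols : List String) (c : String) : (pvIdx cols c).Nodup :=
  (List.nodup_range).filter _

theorem pvIdx_ne_nil {cols : List String} {c : String} (h : c ∈ cols) :
    pvIdx cols c ≠ [] := by
  obtain ⟨i, hi, rfl⟩ := List.getElem_of_mem h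
  have : i ∈ pvIdx cols (cols[i]) :=
    pvIdx_mem.mpr ⟨hi, by rw [List.getD_eq_getElem?_getD, List.getElem?_eq_getElem hi]; rfl⟩
  exact List.ne_nil_of_mem this

-- the (cols.take i).count c as a filtered-range length
theorem pvCount_take (cols : List String) (c : String) :
    ∀ i, i ≤ cols.length →
      (cols.take i).count c = ((List.range i).filter (fun j => cols.getD j "" == c)).length := by
  intro i
  induction i with
  | zero => intro _; simp
  | succ m ih =>
    intro h
    have hm : m < cols.length := by omega
    rw [List.range_succ, List.filter_append, List.length_append]
    rw [List.take_add_one, List.count_append]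
    rw [ih (by omega)]
    congr 1
    rw [List.getElem?_eq_getElem hm]
    simp only [List.filter_cons, List.filter_nil, List.getD_eq_getElem?_getD,
      List.getElem?_eq_getElem hm, Option.toList_some, Option.getD_some]
    by_cases hc : cols[m] = c
    · simp [hc]
    · simp [hc]

-- the rank of position i inside pvIdx cols c is the prior-occurrence count
theorem pvIdx_rank (cols : List String) (c : String) :
    ∀ n, ∀ i < n, cols.getD i "" = c →
      ((List.range i).filter (fun j => cols.getD j "" == c)).length
          < ((List.range n).filter (fun j => cols.getD j "" == c)).length ∧
      ((List.range n).filter (fun j => cols.getD j "" == c)).getD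
          (((List.range i).filter (fun j => cols.getD j "" == c)).length) 0 = i := by
  intro n
  induction n with
  | zero => intro i hi; omega
  | succ m ih =>
    intro i hi hc
    rw [List.range_succ, List.filter_append, List.length_append]
    by_cases him : i = m
    · subst him
      simp only [List.filter_cons, List.filter_nil]
      rw [if_pos (by simp only [hc, beq_self_eq_true])]
      constructor
      · simp
      · rw [List.getD_eq_getElem?_getD, List.getElem?_append_right (le_refl _)]
        simp
    · have hi' : i < m := by omega
      obtain ⟨h1, h2⟩ := ih i hi' hc
      refine ⟨by omega, ?_⟩
      rw [List.getD_eq_getElem?_getD, List.getElem?_append_left h1,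
        ← List.getD_eq_getElem?_getD, h2]

-- ---------- the scatter writes ----------

-- natural-number normal form of one group's writes
def pvWriteNat (J : List Nat) (c : String) (out : List String) : List String :=
  (List.range J.length).foldl (fun o k => o.set (J.getD k 0) (pvVal c k)) out

-- B's write step for one (c, idxs) item equals the normal form, when idxs is nonempty
theorem pvWriteStep_eq (J : List Nat) (c : String) (out : List String) (hne : J ≠ []) :
    (let out1 := PySem.List.pySetD out (PySem.List.pyGetD ((J.map (fun (j : Nat) => (j : Int)))) 0 0) c
     (PySem.List.pyRange 1 ((J.map (fun (j : Nat) => (j : Int))).length : Int) 1).foldl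
       (fun o k => PySem.List.pySetD o (PySem.List.pyGetD (J.map (fun (j : Nat) => (j : Int))) k 0)
         (c ++ "_" ++ PySem.Int.toStr k)) out1)
    = pvWriteNat J c out := by
  obtain ⟨j0, J', rfl⟩ := List.exists_cons_of_ne_nil hne
  simp only [List.length_map, List.length_cons]
  have h0 : PySem.List.pyGetD ((j0 :: J').map (fun (j : Nat) => (j : Int))) 0 0 = (j0 : Int) := by
    simp [PySem.List.pyGetD_zero]
  rw [h0, PySem.List.pySetD_natCast]
  have hrange : PySem.List.pyRange 1 (((J'.length + 1 : Nat) : Int)) 1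
      = (List.range J'.length).map (fun (t : Nat) => ((t + 1 : Nat) : Int)) := by
    rw [PySem.List.pyRange_one]
    have he : (((J'.length + 1 : Nat) : Int) - 1).toNat = J'.length := by omega
    rw [he]
    apply List.map_congr_left
    intro t _
    push_cast
    ring
  rw [hrange, List.foldl_map]
  unfold pvWriteNat
  rw [List.length_cons, List.range_succ_eq_map, List.foldl_cons, List.foldl_map]
  simp only [List.getD_cons_zero]
  apply PySem.List.foldl_congr_mem
  intro o t _
  have hg : PySem.List.pyGetD ((j0 :: J').map (fun (j : Nat) => (j : Int))) ((t + 1 : Nat) : Int) 0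
      = (((j0 :: J').getD (t + 1) 0 : Nat) : Int) := by
    rw [PySem.List.pyGetD_natCast]
    rw [List.getD_eq_getElem?_getD, List.getD_eq_getElem?_getD, List.getElem?_map]
    cases (j0 :: J')[t+1]? <;> simp
  rw [hg, PySem.List.pySetD_natCast]
  congr 1

theorem pvWriteNat_length (J : List Nat) (c : String) (out : List String) :
    (pvWriteNat J c out).length = out.length := by
  unfold pvWriteNat
  induction List.range J.length generalizing out with
  | nil => rfl
  | cons k ks ih => rw [List.foldl_cons, ih]; simp

-- a prefix-fold form: writes of ranks < m
def pvWriteUpTo (J : List Nat) (c : String) (out : List String) (m : Nat) : List String :=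
  (List.range m).foldl (fun o k => o.set (J.getD k 0) (pvVal c k)) out

theorem pvWriteUpTo_length (J : List Nat) (c : String) (out : List String) (m : Nat) :
    (pvWriteUpTo J c out m).length = out.length := by
  unfold pvWriteUpTo
  induction List.range m generalizing out with
  | nil => rfl
  | cons k ks ih => rw [List.foldl_cons, ih]; simp

theorem pvWriteUpTo_getD_untouched (J : List Nat) (c : String) (out : List String) (i : Nat) :
    ∀ m, (∀ k < m, J.getD k 0 ≠ i) →
      (pvWriteUpTo J c out m).getD i "" = out.getD i "" := by
  intro m
  induction m with
  | zero => intro _; rfl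
  | succ p ih =>
    intro h
    have hstep : pvWriteUpTo J c out (p + 1)
        = (pvWriteUpTo J c out p).set (J.getD p 0) (pvVal c p) := by
      unfold pvWriteUpTo
      rw [List.range_succ, List.foldl_append, List.foldl_cons, List.foldl_nil]
    have hne : J.getD p 0 ≠ i := h p (by omega)
    rw [hstep, List.getD_eq_getElem?_getD, List.getElem?_set_ne hne,
      ← List.getD_eq_getElem?_getD]
    exact ih (fun k hk => h k (by omega))

theorem pvWriteUpTo_getD_hit (J : List Nat) (c : String) (out : List String) (i k0 : Nat)
    (hnd : J.Nodup) (hi : i < out.length) (hk0l : k0 < J.length) :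
    ∀ m, k0 < m → m ≤ J.length → J.getD k0 0 = i →
      (pvWriteUpTo J c out m).getD i "" = pvVal c k0 := by
  intro m
  induction m with
  | zero => intro h; omega
  | succ p ih =>
    intro hk0 hm hJ
    have hstep : pvWriteUpTo J c out (p + 1)
        = (pvWriteUpTo J c out p).set (J.getD p 0) (pvVal c p) := by
      unfold pvWriteUpTo
      rw [List.range_succ, List.foldl_append, List.foldl_cons, List.foldl_nil]
    rw [hstep]
    by_cases hkp : k0 = p
    · subst hkp
      rw [hJ]
      rw [List.getD_eq_getElem?_getD, List.getElem?_set_self (by rw [pvWriteUpTo_length]; omega)]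
      simp
    · have hpl : p < J.length := by omega
      have hne : J.getD p 0 ≠ i := by
        intro he
        have e1 : J[p] = i := by
          rw [List.getD_eq_getElem?_getD, List.getElem?_eq_getElem hpl] at he
          simpa using he
        have e2 : J[k0] = i := by
          rw [List.getD_eq_getElem?_getD, List.getElem?_eq_getElem hk0l] at hJ
          simpa using hJ
        have hpk : p = k0 := (List.Nodup.getElem_inj_iff hnd).mp (by rw [e1, e2])
        omega
      rw [List.getD_eq_getElem?_getD, List.getElem?_set_ne hne, ← List.getD_eq_getElem?_getD]
      exact ih (by omega) (by omega) hJ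

-- one group's writes, pointwise
theorem pvWriteNat_getD (cols : List String) (c : String) (out : List String)
    (_hc : c ∈ cols) (hlen : out.length = cols.length) (i : Nat) (hi : i < cols.length) :
    (pvWriteNat (pvIdx cols c) c out).getD i ""
      = if cols.getD i "" = c
          then pvVal c ((cols.take i).count c)
          else out.getD i "" := by
  have hnat : pvWriteNat (pvIdx cols c) c out = pvWriteUpTo (pvIdx cols c) c out (pvIdx cols c).length := rfl
  rw [hnat]
  by_cases hci : cols.getD i "" = c
  · rw [if_pos hci]
    obtain ⟨hlt, hget⟩ := pvIdx_rank cols c cols.length i hi hci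
    have hcnt : (cols.take i).count c
        = ((List.range i).filter (fun j => cols.getD j "" == c)).length :=
      pvCount_take cols c i (by omega)
    rw [hcnt]
    exact pvWriteUpTo_getD_hit (pvIdx cols c) c out i _ (pvIdx_nodup cols c) (by omega) hlt
      (pvIdx cols c).length hlt (le_refl _) hget
  · rw [if_neg hci]
    apply pvWriteUpTo_getD_untouched
    intro k hk hkeq
    have hmem : (pvIdx cols c).getD k 0 ∈ pvIdx cols c := by
      rw [List.getD_eq_getElem?_getD, List.getElem?_eq_getElem hk]
      exact List.getElem_mem hk
    rw [hkeq] at hmem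
    exact hci (pvIdx_mem.mp hmem).2

-- ---------- the outer fold over groups ----------

theorem pvOuter (cols : List String) :
    ∀ (K : List String) (out : List String), out.length = cols.length →
      (∀ c ∈ K, c ∈ cols) →
      (K.foldl (fun out c => pvWriteNat (pvIdx cols c) c out) out).length = cols.length ∧
      ∀ i < cols.length,
        (K.foldl (fun out c => pvWriteNat (pvIdx cols c) c out) out).getD i ""
          = if cols.getD i "" ∈ K
              then pvVal (cols.getD i "") ((cols.take i).count (cols.getD i ""))
              else out.getD i "" := by
  intro K
  induction K with
  | nil =>
    intro out hlen _
    refine ⟨hlen, ?_⟩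
    intro i hi
    simp
  | cons c K' ih =>
    intro out hlen hmem
    have hc : c ∈ cols := hmem c (List.mem_cons_self ..)
    have hlen1 : (pvWriteNat (pvIdx cols c) c out).length = cols.length := by
      rw [pvWriteNat_length]; exact hlen
    obtain ⟨ihlen, ihget⟩ := ih (pvWriteNat (pvIdx cols c) c out) hlen1
      (fun x hx => hmem x (List.mem_cons_of_mem _ hx))
    refine ⟨by rw [List.foldl_cons]; exact ihlen, ?_⟩
    intro i hi
    rw [List.foldl_cons, ihget i hi, pvWriteNat_getD cols c out hc hlen i hi]
    simp only [List.mem_cons]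
    by_cases h1 : cols.getD i "" ∈ K'
    · rw [if_pos h1, if_pos (Or.inr h1)]
    · rw [if_neg h1]
      by_cases h2 : cols.getD i "" = c
      · rw [if_pos h2, if_pos (Or.inl h2), h2]
      · rw [if_neg h2, if_neg (by tauto)]

theorem pvGetD_eq_getElem {l : List String} {i : Nat} (h : i < l.length) : l.getD i "" = l[i] := by
  rw [List.getD_eq_getElem?_getD, List.getElem?_eq_getElem h]; rfl

theorem pvB_ref (cols : List String) : dedupe_cols_py_alt cols = pvRef cols := by
  unfold dedupe_cols_py_alt
  dsimp only
  rw [pvGroups_items, List.foldl_map]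
  have hbody :
      ((PySem.Set.ofList cols).foldl
        (fun out c =>
          let ci := (c, (pvIdx cols c).map (fun (j : Nat) => (j : Int)))
          let out1 := PySem.List.pySetD out (PySem.List.pyGetD ci.2 0 0) ci.1
          (PySem.List.pyRange 1 (ci.2.length : Int) 1).foldl
            (fun o k => PySem.List.pySetD o (PySem.List.pyGetD ci.2 k 0)
              (ci.1 ++ "_" ++ PySem.Int.toStr k)) out1)
        (List.replicate cols.length ""))
      = ((PySem.Set.ofList cols).foldl
          (fun out c => pvWriteNat (pvIdx cols c) c out)
          (List.replicate cols.length "")) := by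
    apply PySem.List.foldl_congr_mem
    intro out c hcK
    have hc : c ∈ cols := (PySem.Set.mem_ofList _ _).mp hcK
    exact pvWriteStep_eq (pvIdx cols c) c out (pvIdx_ne_nil hc)
  rw [hbody]
  obtain ⟨hlen, hget⟩ := pvOuter cols (PySem.Set.ofList cols) (List.replicate cols.length "")
    (by simp) (fun c hcK => (PySem.Set.mem_ofList _ _).mp hcK)
  apply List.ext_getElem
  · rw [hlen, pvRef, List.length_map, List.length_range]
  · intro i h1 h2
    have hi : i < cols.length := by rw [hlen] at h1; exact h1
    have hgi : cols.getD i "" = cols[i] := pvGetD_eq_getElem hi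
    have hmem : cols.getD i "" ∈ PySem.Set.ofList cols := by
      apply (PySem.Set.mem_ofList _ _).mpr
      rw [hgi]
      exact List.getElem_mem hi
    have hg := hget i hi
    rw [if_pos hmem] at hg
    rw [← pvGetD_eq_getElem h1, hg]
    simp only [pvRef, List.getElem_map, List.getElem_range, hgi]

-- ===== VERDICT (by name: the statement is the Claim_ definition above) =====
theorem dedupe_cols_py_spec : Claim_equal_dedupe_cols_py := by
  intro cols _
  unfold Spec_dedupe_cols_py
  rw [pvA_ref, pvB_ref]
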